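-- pv_equiv track=rewrite | github.com/uber/NullAway | scripts/convert_addSourceLines_textblock.py | split_string_literal
-- ===== SOURCE A (Python) =====
-- from typing import Iterable, Iterator, List, Optional, Tuple
--
-- def split_string_literal(body: str) -> Optional[Tuple[str, str]]:
--     """Split a Java string literal from the start of body, returning (content, rest)."""
--     if not body.startswith('"'):
--         return None
--     i = 1
--     content = []
--     while i < len(body):
--         c = body[i]
--         if c == "\\":
--             if i + 1 < len(body):
--                 content.append(body[i : i + 2])
--                 i += 2
--                 continue
--         if c == '"':
--             return "".join(content), body[i + 1 :]
--         content.append(c)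
--         i += 1
--     return None
-- ===== SOURCE B (Python) =====
-- def split_string_literal(body):
--     """Split a Java string literal from the start of body, returning (content, rest).
--
--     Instead of scanning character by character, jump between '"' positions with
--     str.find and accept the first quote preceded by an even run of backslashes;
--     the content is then the verbatim slice between the quotes.
--     """
--     if not body.startswith('"'):
--         return None
--     j = body.find('"', 1)
--     while j != -1:
--         k = j
--         while k > 0 and body[k - 1] == "\\":
--             k -= 1
--         if (j - k) % 2 == 0:
--             return body[1:j], body[j + 1:]
--         j = body.find('"', j + 1)
--     return None
-- ===== Notes on version B (the rewrite author's own statement) =====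
-- stated objective: alternative
-- what changed: B replaces A's character-by-character scan with an accumulator list by jumping between quote positions via str.find, accepting the first quote preceded by an even run of backslashes and returning verbatim slices.
import Mathlib
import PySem

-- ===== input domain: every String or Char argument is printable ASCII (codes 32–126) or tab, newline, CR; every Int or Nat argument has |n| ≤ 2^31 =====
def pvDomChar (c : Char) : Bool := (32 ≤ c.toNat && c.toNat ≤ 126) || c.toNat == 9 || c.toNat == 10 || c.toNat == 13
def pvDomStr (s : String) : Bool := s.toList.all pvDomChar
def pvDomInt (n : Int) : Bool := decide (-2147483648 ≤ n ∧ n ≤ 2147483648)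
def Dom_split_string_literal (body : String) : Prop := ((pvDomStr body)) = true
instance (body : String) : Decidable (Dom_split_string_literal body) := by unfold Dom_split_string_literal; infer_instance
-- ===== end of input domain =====

-- B replaces A's character-by-character scan with an accumulator list by jumping between
-- quote positions via str.find and accepting the first quote preceded by an even run of
-- backslashes; content is a verbatim slice (objective: alternative algorithm).

-- ===== PORT A =====
-- the while-loop of A: cs = body[i:], content = the accumulated pieces
def splitLoopA : List Char → List String → Option (String × String)
  | [], _ => none
  | c :: rest, content =>
    if c = '\\' then
      match rest with
      | d :: rest' => splitLoopA rest' (content ++ [String.ofList [c, d]])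
      | [] =>
        -- i + 1 = len(body): falls through (c ≠ '"'), appends c, then the loop ends
        splitLoopA [] (content ++ [String.ofList [c]])
    else if c = '"' then
      some (PySem.Str.join "" content, String.ofList rest)
    else
      splitLoopA rest (content ++ [String.ofList [c]])

def split_string_literal (body : String) : Option (String × String) :=
  if ¬ (PySem.Str.startswith body "\"") then none
  else splitLoopA (body.toList.drop 1) []

-- ===== PORT B =====
-- inner while of B: while k > 0 and body[k-1] == '\\': k -= 1
def backKB (l : List Char) : Nat → Nat
  | 0 => 0
  | (k + 1) => if l[k]? = some '\\' then backKB l k else (k + 1)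

-- bounds of str.find('"', j) when it hits, used for termination of the outer loop
theorem findQuoteB_bounds (l : List Char) (j : Nat)
    (h : PySem.Chars.findFrom l ['"'] (j : Int) none ≠ -1) :
    (j : Int) ≤ PySem.Chars.findFrom l ['"'] (j : Int) none ∧
    (PySem.Chars.findFrom l ['"'] (j : Int) none).toNat < l.length ∧ j ≤ l.length := by
  by_cases hle : j ≤ l.length
  · obtain ⟨h1, h2, -⟩ := PySem.Chars.findFrom_natCast_spec l ['"'] j hle h
    refine ⟨h1, ?_, hle⟩
    have hlen := h2.length_le
    simp [List.length_drop] at hlen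
    omega
  · exfalso
    apply h
    simp only [PySem.Chars.findFrom]
    have h0 : ¬ ((j : Int) < 0) := by omega
    rw [if_neg h0]
    rw [if_pos (by omega : (l.length : Int) < (j : Int))]

-- outer while of B over the current find position j
def goB (l : List Char) (j : Nat) : Option (String × String) :=
  let m := PySem.Chars.findFrom l ['"'] (j : Int) none
  if hm : m = -1 then none
  else
    let k := backKB l m.toNat
    if (m.toNat - k) % 2 = 0 then
      some (String.ofList (PySem.List.slice l (some 1) (some m)),
            String.ofList (PySem.List.slice l (some (m + 1)) none))
    else goB l (m.toNat + 1)
  termination_by l.length + 1 - j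
  decreasing_by
    have h := findQuoteB_bounds l j hm
    omega

def split_string_literal_alt (body : String) : Option (String × String) :=
  if ¬ (PySem.Str.startswith body "\"") then none
  else goB body.toList 1

-- ===== PRECONDITION & SPEC =====
def Spec_split_string_literal (body : String) (out : Option (String × String)) : Prop := out = split_string_literal_alt body
instance (body : String) (out : Option (String × String)) : Decidable (Spec_split_string_literal body out) := by unfold Spec_split_string_literal; infer_instance

-- ===== CLAIM (what is proved, stated in full; the proofs are below) =====
def Claim_equal_split_string_literal : Prop := ∀ (body : String), Dom_split_string_literal body → Spec_split_string_literal body (split_string_literal body)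

-- ===== LEMMAS AND PROOFS =====

-- the common functional core: index (in the tail) of the closing quote, if any
def fSpec : List Char → Option Nat
  | [] => none
  | c :: rest =>
    if c = '"' then some 0
    else if c = '\\' then
      match rest with
      | [] => none
      | _ :: rest' => (fSpec rest').map (· + 2)
    else (fSpec rest).map (· + 1)

-- length of the run of backslashes at the end of w
def bsRun (w : List Char) : Nat := (w.reverse.takeWhile (· = '\\')).length

theorem bsRun_le (w : List Char) : bsRun w ≤ w.length := by
  have h := (List.takeWhile_prefix (p := (· = '\\')) (l := w.reverse)).length_le
  simpa [bsRun] using h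

theorem bsRun_append_bs (w : List Char) : bsRun (w ++ ['\\']) = bsRun w + 1 := by
  simp [bsRun, List.reverse_append]

theorem bsRun_cons (c : Char) (w : List Char) :
    bsRun (c :: w) = if (∀ a ∈ w, a = '\\') ∧ c = '\\' then w.length + 1 else bsRun w := by
  unfold bsRun
  rw [List.reverse_cons, List.takeWhile_append]
  by_cases hall : ∀ a ∈ w, a = '\\'
  · have hts : w.reverse.takeWhile (· = '\\') = w.reverse :=
      List.takeWhile_eq_self_iff.mpr (by intro a ha; simp [hall a (List.mem_reverse.mp ha)])
    rw [if_pos (by rw [hts])]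
    by_cases hc : c = '\\' <;> simp [hc, hts]
    exact hall
  · have hne : ¬ (w.reverse.takeWhile (· = '\\')).length = w.reverse.length := by
      intro hl
      apply hall
      intro a ha
      have := List.takeWhile_eq_self_iff.mp
        ((List.takeWhile_prefix (p := (· = '\\')) (l := w.reverse)).eq_of_length hl)
      simpa using this a (List.mem_reverse.mpr ha)
    rw [if_neg hne]
    simp [hall]

theorem join_nil_flatten (ps : List (List Char)) : PySem.Chars.join [] ps = ps.flatten := by
  induction ps with
  | nil => simp [PySem.Chars.join_nil]
  | cons p rest ih =>
      cases rest with
      | nil => simp [PySem.Chars.join_singleton]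
      | cons q rest' => rw [PySem.Chars.join_cons_cons, List.flatten_cons, ih]; simp

-- A's loop equals fSpec, content tracked as the flattened prefix
theorem splitLoopA_eq (cs : List Char) (content : List String) :
    splitLoopA cs content = (fSpec cs).map
      (fun d => (String.ofList ((content.map String.toList).flatten ++ cs.take d),
                 String.ofList (cs.drop (d + 1)))) := by
  induction cs, content using splitLoopA.induct with
  | case1 content => simp [splitLoopA, fSpec]
  | case2 content d rest' ih =>
      rw [show splitLoopA ('\\' :: d :: rest') content
            = splitLoopA rest' (content ++ [String.ofList ['\\', d]]) from rfl]
      rw [ih]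
      rw [show fSpec ('\\' :: d :: rest') = (fSpec rest').map (· + 2) from rfl]
      cases fSpec rest' <;> simp [List.take_succ_cons, List.drop_succ_cons]
  | case3 content ih =>
      rw [show splitLoopA ['\\'] content
            = splitLoopA [] (content ++ [String.ofList ['\\']]) from rfl]
      simp [splitLoopA, fSpec]
  | case4 rest content h =>
      rw [show splitLoopA ('"' :: rest) content
            = some (PySem.Str.join "" content, String.ofList rest) from by
            rw [splitLoopA.eq_def]; simp]
      rw [show fSpec ('"' :: rest) = some 0 from by rw [fSpec.eq_def]; simp]
      simp [PySem.Str.join, join_nil_flatten]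
  | case5 c rest content hbs hq ih =>
      rw [show splitLoopA (c :: rest) content
            = splitLoopA rest (content ++ [String.ofList [c]]) from by
            rw [splitLoopA.eq_def]; simp [hbs, hq]]
      rw [ih]
      rw [show fSpec (c :: rest) = (fSpec rest).map (· + 1) from by
            rw [fSpec.eq_def]; simp [hbs, hq]]
      cases fSpec rest <;> simp [List.take_succ_cons, List.drop_succ_cons]

theorem fSpec_no_quote (u : List Char) (h : '"' ∉ u) : fSpec u = none := by
  induction u using fSpec.induct with
  | case1 => simp [fSpec]
  | case2 rest => simp at h
  | case3 h1 => rw [fSpec.eq_def]; simp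
  | case4 d rest' h1 ih =>
      rw [fSpec.eq_def]
      simp only [List.mem_cons, not_or] at h
      simp [ih (by simp [h.2.2])]
  | case5 c rest h1 h2 ih =>
      rw [fSpec.eq_def]
      simp only [List.mem_cons, not_or] at h
      simp [h1, h2, ih (by simp [h.2])]

theorem bsRun_all (w : List Char) (h : ∀ a ∈ w, a = '\\') : bsRun w = w.length := by
  unfold bsRun
  rw [List.takeWhile_eq_self_iff.mpr (by intro a ha; simp [h a (List.mem_reverse.mp ha)])]
  simp

theorem bsRun_cons_cons_parity (x : Char) (w : List Char) :
    bsRun ('\\' :: x :: w) % 2 = bsRun w % 2 := by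
  rw [bsRun_cons, bsRun_cons]
  by_cases hall : ∀ a ∈ x :: w, a = '\\'
  · have hw : ∀ a ∈ w, a = '\\' := fun a ha => hall a (List.mem_cons_of_mem _ ha)
    rw [if_pos ⟨hall, rfl⟩, bsRun_all w hw]
    simp
    omega
  · rw [if_neg (fun hc => hall hc.1)]
    by_cases h2 : (∀ a ∈ w, a = '\\') ∧ x = '\\'
    · exfalso
      apply hall
      intro a ha
      rcases List.mem_cons.mp ha with h | h
      · rw [h, h2.2]
      · exact h2.1 a h
    · rw [if_neg h2]

theorem fSpec_block_aux (n : Nat) : ∀ (w v : List Char), w.length ≤ n → '"' ∉ w →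
    fSpec (w ++ '"' :: v) =
      if bsRun w % 2 = 0 then some w.length
      else (fSpec v).map (· + (w.length + 1)) := by
  induction n with
  | zero =>
      intro w v hn hw
      rw [List.length_eq_zero_iff.mp (Nat.le_zero.mp hn)]
      rw [fSpec.eq_def]
      simp [bsRun]
  | succ n ih =>
      intro w v hn hw
      match w with
      | [] =>
          rw [fSpec.eq_def]; simp [bsRun]
      | c :: w' =>
          simp only [List.mem_cons, not_or] at hw
          by_cases hc : c = '\\'
          · subst hc
            match w' with
            | [] =>
                rw [fSpec.eq_def]
                simp [bsRun]
            | x :: w'' =>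
                rw [show ('\\' :: x :: w'') ++ '"' :: v = '\\' :: x :: (w'' ++ '"' :: v) from rfl]
                rw [show fSpec ('\\' :: x :: (w'' ++ '"' :: v))
                      = (fSpec (w'' ++ '"' :: v)).map (· + 2) from by rw [fSpec.eq_def]; simp]
                have hw'' : '"' ∉ w'' := by
                  intro hmem
                  exact hw.2 (List.mem_cons_of_mem _ hmem)
                rw [ih w'' v (by simp at hn ⊢; omega) hw'']
                have hp := bsRun_cons_cons_parity x w''
                by_cases he : bsRun w'' % 2 = 0
                · rw [if_pos he, if_pos (by omega)]
                  simp
                · rw [if_neg he, if_neg (by omega)]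
                  cases fSpec v <;> simp
                  omega
          · rw [show (c :: w') ++ '"' :: v = c :: (w' ++ '"' :: v) from rfl]
            by_cases hq : c = '"'
            · exact absurd hq.symm hw.1
            · rw [show fSpec (c :: (w' ++ '"' :: v))
                    = (fSpec (w' ++ '"' :: v)).map (· + 1) from by rw [fSpec.eq_def]; simp [hc, hq]]
              rw [ih w' v (by simp at hn; omega) hw.2]
              rw [bsRun_cons,
                  if_neg (show ¬ ((∀ a ∈ w', a = '\\') ∧ c = '\\') from fun h => hc h.2)]
              by_cases he : bsRun w' % 2 = 0
              · rw [if_pos he, if_pos he]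
                simp
              · rw [if_neg he, if_neg he]
                cases fSpec v <;> simp
                omega

-- parity characterisation: fSpec past a quote-free block w
theorem fSpec_block (w v : List Char) (hw : '"' ∉ w) :
    fSpec (w ++ '"' :: v) =
      if bsRun w % 2 = 0 then some w.length
      else (fSpec v).map (· + (w.length + 1)) := fSpec_block_aux w.length w v le_rfl hw

-- B's inner loop computes the start of the backslash run ending before m
theorem bsRun_append_nonbs (w : List Char) (c : Char) (hc : c ≠ '\\') :
    bsRun (w ++ [c]) = 0 := by
  simp [bsRun, List.reverse_append, hc]

theorem backKB_stop (l : List Char) (j : Nat) (hj : l[j - 1]? = some '"') (h1 : 1 ≤ j) :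
    backKB l j = j := by
  obtain ⟨k, hk⟩ : ∃ k, j = k + 1 := ⟨j - 1, by omega⟩
  subst hk
  simp only [Nat.add_sub_cancel] at hj
  rw [show backKB l (k + 1) = if l[k]? = some '\\' then backKB l k else (k + 1) from rfl]
  rw [if_neg (by rw [hj]; decide)]

theorem backKB_eq_aux (n : Nat) : ∀ (l : List Char) (j m : Nat), m - j ≤ n →
    l[j - 1]? = some '"' → 1 ≤ j → j ≤ m → m ≤ l.length →
    backKB l m = m - bsRun ((l.drop j).take (m - j)) := by
  induction n with
  | zero =>
      intro l j m hn hj h1 hjm hm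
      have hmj : m = j := by omega
      subst hmj
      rw [backKB_stop l m hj h1]
      simp [bsRun]
  | succ n ih =>
      intro l j m hn hj h1 hjm hm
      by_cases hz : m - j = 0
      · have hmj : m = j := by omega
        subst hmj
        rw [backKB_stop l m hj h1]
        simp [bsRun]
      · have hw : ((l.drop j).take (m - j)) = ((l.drop j).take (m - 1 - j)) ++ (l[m - 1]?).toList := by
          rw [(show m - j = (m - 1 - j) + 1 by omega), List.take_add_one, List.getElem?_drop,
              (show j + (m - 1 - j) = m - 1 by omega)]
        have hgl : l[m - 1]? = some (l[m - 1]'(by omega)) := List.getElem?_eq_getElem (by omega)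
        obtain ⟨k, hk⟩ : ∃ k, m = k + 1 := ⟨m - 1, by omega⟩
        subst hk
        simp only [Nat.add_sub_cancel] at hw hgl
        by_cases hbs : l[k]'(by omega) = '\\'
        · rw [show backKB l (k + 1) = if l[k]? = some '\\' then backKB l k else (k + 1) from rfl,
              if_pos (by rw [hgl, hbs])]
          rw [ih l j k (by omega) hj h1 (by omega) (by omega)]
          rw [hw, hgl, hbs]
          simp only [Option.toList_some]
          rw [bsRun_append_bs ((l.drop j).take (k - j))]
          have hle := bsRun_le ((l.drop j).take (k - j))
          have hlt := List.length_take_le (k - j) (l.drop j)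
          omega
        · rw [show backKB l (k + 1) = if l[k]? = some '\\' then backKB l k else (k + 1) from rfl,
              if_neg (by rw [hgl]; simp [hbs])]
          rw [hw, hgl]
          simp only [Option.toList_some]
          rw [bsRun_append_nonbs _ _ hbs]
          omega

theorem backKB_eq (l : List Char) (j m : Nat)
    (hj : l[j - 1]? = some '"') (h1 : 1 ≤ j) (hjm : j ≤ m) (hm : m ≤ l.length) :
    backKB l m = m - bsRun ((l.drop j).take (m - j)) :=
  backKB_eq_aux (m - j) l j m le_rfl hj h1 hjm hm

-- B's outer loop equals fSpec on the suffix
theorem goB_eq_aux (n : Nat) : ∀ (l : List Char) (j : Nat), l.length + 1 - j ≤ n → 1 ≤ j →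
    l[j - 1]? = some '"' →
    goB l j = (fSpec (l.drop j)).map
      (fun d => (String.ofList ((l.drop 1).take (j - 1 + d)),
                 String.ofList (l.drop (j + d + 1)))) := by
  induction n with
  | zero =>
      intro l j hn h1 hj
      obtain ⟨hb, -⟩ := List.getElem?_eq_some_iff.mp hj
      omega
  | succ n ih =>
      intro l j hn h1 hj
      obtain ⟨hb, -⟩ := List.getElem?_eq_some_iff.mp hj
      have hjlen : j ≤ l.length := by omega
      rw [goB]
      by_cases hneg : PySem.Chars.findFrom l ['"'] (j : Int) none = -1
      · rw [dif_pos hneg]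
        have hnoq : '"' ∉ l.drop j := by
          have hni := (PySem.Chars.findFrom_natCast_eq_neg_one_iff l ['"'] j hjlen).mp hneg
          intro hmem
          exact hni ((List.singleton_infix_iff _ _).mpr hmem)
        rw [fSpec_no_quote _ hnoq]
        rfl
      · rw [dif_neg hneg]
        obtain ⟨hjm, hpre, hmin⟩ := PySem.Chars.findFrom_natCast_spec l ['"'] j hjlen hneg
        have hm0 : (0 : Int) ≤ PySem.Chars.findFrom l ['"'] (j : Int) none := by
          have : (0 : Int) ≤ (j : Int) := by positivity
          omega
        set M := (PySem.Chars.findFrom l ['"'] (j : Int) none).toNat with hMdef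
        have hmM : PySem.Chars.findFrom l ['"'] (j : Int) none = (M : Int) := by omega
        have hjM : j ≤ M := by omega
        have hMlen : M < l.length := by
          have hl := hpre.length_le
          simp only [List.length_cons, List.length_nil, List.length_drop] at hl
          omega
        have hqM : l[M]? = some '"' := by
          obtain ⟨t, ht⟩ := hpre
          have h0 : (l.drop M)[0]? = some '"' := by rw [← ht]; rfl
          rwa [List.getElem?_drop] at h0
        obtain ⟨hMl2, hqMe⟩ := List.getElem?_eq_some_iff.mp hqM
        have hdropM : l.drop M = '"' :: l.drop (M + 1) := by
          rw [List.drop_eq_getElem_cons hMlen, hqMe]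
        have hsplit : l.drop j = ((l.drop j).take (M - j)) ++ '"' :: l.drop (M + 1) := by
          conv_lhs => rw [← List.take_append_drop (M - j) (l.drop j)]
          rw [List.drop_drop, (show j + (M - j) = M by omega), hdropM]
        have hwfree : '"' ∉ (l.drop j).take (M - j) := by
          intro hmem
          obtain ⟨i, hi, hival⟩ := List.mem_iff_getElem.mp hmem
          have hil : i < M - j := by
            have := hi
            simp only [List.length_take, List.length_drop] at this
            omega
          have hiq : l[j + i]? = some '"' := by
            rw [← hival, List.getElem_take, List.getElem_drop]
            exact (List.getElem?_eq_some_iff.mpr ⟨by omega, rfl⟩)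
          apply hmin (j + i) (by omega) (by omega)
          obtain ⟨hiv2, hv⟩ := List.getElem?_eq_some_iff.mp hiq
          rw [List.drop_eq_getElem_cons (by omega), hv]
          exact ⟨_, rfl⟩
        have hbk : backKB l M = M - bsRun ((l.drop j).take (M - j)) :=
          backKB_eq l j M hj h1 hjM (by omega)
        have hwlen : ((l.drop j).take (M - j)).length = M - j := by
          simp only [List.length_take, List.length_drop]
          omega
        have hrle : bsRun ((l.drop j).take (M - j)) ≤ M - j := by
          have := bsRun_le ((l.drop j).take (M - j))
          omega
        have hfs := fSpec_block ((l.drop j).take (M - j)) (l.drop (M + 1)) hwfree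
        rw [← hsplit] at hfs
        rw [hbk, hfs, hwlen]
        by_cases hpar : bsRun ((l.drop j).take (M - j)) % 2 = 0
        · rw [if_pos (by omega : (M - (M - bsRun ((l.drop j).take (M - j)))) % 2 = 0),
              if_pos hpar]
          rw [hmM]
          rw [(show (1 : Int) = ((1 : Nat) : Int) from rfl)]
          rw [PySem.List.slice_natCast]
          rw [(show ((M : Nat) : Int) + ((1 : Nat) : Int) = (((M + 1 : Nat)) : Int) by push_cast; ring)]
          rw [PySem.List.slice_from_natCast]
          simp only [Option.map_some]
          rw [(show j - 1 + (M - j) = M - 1 by omega), (show j + (M - j) + 1 = M + 1 by omega)]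
        · rw [if_neg (by omega : ¬ (M - (M - bsRun ((l.drop j).take (M - j)))) % 2 = 0),
              if_neg hpar]
          rw [ih l (M + 1) (by omega) (by omega) (by simpa using hqM)]
          cases fSpec (l.drop (M + 1)) with
          | none => rfl
          | some d =>
              simp only [Option.map_some]
              rw [(show M + 1 - 1 + d = j - 1 + (d + (M - j + 1)) by omega),
                  (show M + 1 + d + 1 = j + (d + (M - j + 1)) + 1 by omega)]

theorem goB_eq (l : List Char) (j : Nat) (h1 : 1 ≤ j) (hj : l[j - 1]? = some '"') :
    goB l j = (fSpec (l.drop j)).map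
      (fun d => (String.ofList ((l.drop 1).take (j - 1 + d)),
                 String.ofList (l.drop (j + d + 1)))) :=
  goB_eq_aux (l.length + 1 - j) l j le_rfl h1 hj

-- ===== VERDICT (by name: the statement is the Claim_ definition above) =====
theorem split_string_literal_spec : Claim_equal_split_string_literal := by
  intro body _
  unfold Spec_split_string_literal split_string_literal split_string_literal_alt
  by_cases hs : PySem.Str.startswith body "\"" = true
  · have hs' : PySem.Chars.startswith body.toList ['"'] = true := by simpa using hs
    rw [if_neg (by simp [hs']), if_neg (by simp [hs'])]
    obtain ⟨t, ht⟩ : ∃ t, body.toList = '"' :: t := by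
      have hsl : PySem.Chars.startswith body.toList ['"'] = true := by
        rw [PySem.Str.startswith_eq] at hs
        exact hs
      obtain ⟨t, htt⟩ := (PySem.Chars.startswith_iff _ _).mp hsl
      exact ⟨t, by rw [← htt]; rfl⟩
    rw [splitLoopA_eq]
    rw [goB_eq body.toList 1 le_rfl (by rw [ht]; rfl)]
    cases h : fSpec (body.toList.drop 1) with
    | none => rfl
    | some d =>
        simp only [Option.map_some, List.map_nil, List.flatten_nil, List.nil_append]
        rw [List.drop_drop]
        rw [(show 1 + (d + 1) = 1 + d + 1 by omega), (show 1 - 1 + d = d by omega)]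
  · have hs' : PySem.Chars.startswith body.toList ['"'] = false := by simpa using hs
    rw [if_pos (by simp [hs']), if_pos (by simp [hs'])]
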